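-- pv_equiv track=rewrite | github.com/misaelvf2/EPIJudge | epi_judge_python/three_sum.py | has_three_sum_extra_space
-- ===== SOURCE A (Python) =====
-- from typing import List
--
-- def has_three_sum_extra_space(A: List[int], t: int) -> bool:
--     # Approach based on extra space utilization.
--     # First, store each element in a hashset.
--     # Then, iterate over the list, subtracting each element
--     # from the target.
--     # The problem now reduces to finding a pair of numbers that
--     # add up to the difference between the target and the number
--     # we chose in the outer loop.
--     # In other words, 3Sum now reduces to 2Sum.
--     # This is the extra space implementation of 2Sum.
--     # Time: O(n^2), both the outer and inner loops look at each element once.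
--     # Space: O(n), we store every element in a set.
--     num_set = set(A)
--     for i, num1 in enumerate(A):
--         first_complement = t - num1
--         # Problem now reduces to 2Sum.
--         for _, num2 in enumerate(A[i:], start=i):
--             second_complement = first_complement - num2
--             if second_complement in num_set:
--                 return True
--     return False
-- ===== SOURCE B (Python) =====
-- def has_three_sum_extra_space(A, t):
--     # Build the set of all pairwise sums once, then scan A once:
--     # three values (reuse allowed) sum to t iff some c in A has t - c
--     # among the pairwise sums.
--     pair_sums = {a + b for a in A for b in A}
--     return any(t - c in pair_sums for c in A)
-- ===== Notes on version B (the rewrite author's own statement) =====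
-- stated objective: alternative
-- what changed: Replaces the nested enumerate/suffix-slice scan with membership in the set(A) by a precomputed set of all pairwise sums followed by a single linear scan testing t - c against it.
import Mathlib
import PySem

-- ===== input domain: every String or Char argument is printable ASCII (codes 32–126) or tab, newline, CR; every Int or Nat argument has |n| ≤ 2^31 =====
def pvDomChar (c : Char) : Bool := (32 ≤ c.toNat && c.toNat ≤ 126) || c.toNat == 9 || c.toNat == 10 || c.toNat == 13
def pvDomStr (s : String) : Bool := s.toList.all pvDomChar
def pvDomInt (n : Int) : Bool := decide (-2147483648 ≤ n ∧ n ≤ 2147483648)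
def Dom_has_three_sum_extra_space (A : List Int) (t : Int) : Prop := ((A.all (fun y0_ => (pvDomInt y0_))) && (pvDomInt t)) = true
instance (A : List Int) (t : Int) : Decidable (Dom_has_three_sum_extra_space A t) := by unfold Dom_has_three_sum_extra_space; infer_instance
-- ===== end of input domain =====

-- B replaces A's nested scan against set(A) by a precomputed set of all pairwise
-- sums followed by a single scan (alternative decomposition, same asymptotic cost).

-- ===== PORT A =====
def has_three_sum_extra_space (A : List Int) (t : Int) : Bool :=
  let num_set : PySem.Set Int := PySem.Set.ofList A
  (PySem.List.enumerate A 0).any (fun p =>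
    let first_complement := t - p.2
    (PySem.List.slice A (some p.1) none).any (fun num2 =>
      PySem.Set.contains num_set (first_complement - num2)))

-- ===== PORT B =====
def has_three_sum_extra_space_alt (A : List Int) (t : Int) : Bool :=
  let pair_sums : PySem.Set Int :=
    PySem.Set.ofList (A.flatMap (fun a => A.map (fun b => a + b)))
  A.any (fun c => PySem.Set.contains pair_sums (t - c))

-- ===== PRECONDITION & SPEC =====
def Spec_has_three_sum_extra_space (A : List Int) (t : Int) (out : Bool) : Prop := out = has_three_sum_extra_space_alt A t
instance (A : List Int) (t : Int) (out : Bool) : Decidable (Spec_has_three_sum_extra_space A t out) := by unfold Spec_has_three_sum_extra_space; infer_instance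

-- ===== CLAIM (what is proved, stated in full; the proofs are below) =====
def Claim_equal_has_three_sum_extra_space : Prop := ∀ (A : List Int) (t : Int), Dom_has_three_sum_extra_space A t → Spec_has_three_sum_extra_space A t (has_three_sum_extra_space A t)

-- ===== LEMMAS AND PROOFS =====

-- Both programs decide the same proposition: some three values of A (reuse allowed) sum to t.
theorem hts_A_iff (A : List Int) (t : Int) :
    has_three_sum_extra_space A t = true ↔
      ∃ x ∈ A, ∃ y ∈ A, (t - x - y) ∈ A := by
  simp only [has_three_sum_extra_space, List.any_eq_true,
    PySem.List.mem_enumerate_iff]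
  constructor
  · rintro ⟨p, ⟨k, hk, rfl⟩, h2⟩
    simp only [zero_add] at h2
    rw [PySem.List.slice_from_natCast] at h2
    obtain ⟨y, hy, hmem⟩ := h2
    refine ⟨A[k], List.getElem_mem hk, y, List.mem_of_mem_drop hy, ?_⟩
    simpa [PySem.Set.contains, PySem.Set.mem_ofList, sub_sub] using hmem
  · rintro ⟨x, hx, y, hy, hz⟩
    obtain ⟨i, hi, rfl⟩ := List.getElem_of_mem hx
    obtain ⟨j, hj, rfl⟩ := List.getElem_of_mem hy
    rcases le_total i j with hij | hij
    · refine ⟨((i : Int), A[i]), ⟨i, hi, by simp⟩, ?_⟩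
      rw [PySem.List.slice_from_natCast]
      refine ⟨A[j], ?_, ?_⟩
      · have hb : j - i < (A.drop i).length := by rw [List.length_drop]; omega
        have e : (A.drop i)[j - i] = A[j] := by rw [List.getElem_drop]; congr 1; omega
        exact e ▸ List.getElem_mem hb
      · simpa [PySem.Set.contains, PySem.Set.mem_ofList, sub_sub] using hz
    · refine ⟨((j : Int), A[j]), ⟨j, hj, by simp⟩, ?_⟩
      rw [PySem.List.slice_from_natCast]
      refine ⟨A[i], ?_, ?_⟩
      · have hb : i - j < (A.drop j).length := by rw [List.length_drop]; omega
        have e : (A.drop j)[i - j] = A[i] := by rw [List.getElem_drop]; congr 1; omega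
        exact e ▸ List.getElem_mem hb
      · have : t - A[j] - A[i] = t - A[i] - A[j] := by ring
        rw [this]
        simpa [PySem.Set.contains, PySem.Set.mem_ofList, sub_sub] using hz
  
theorem hts_B_iff (A : List Int) (t : Int) :
    has_three_sum_extra_space_alt A t = true ↔
      ∃ x ∈ A, ∃ y ∈ A, (t - x - y) ∈ A := by
  simp only [has_three_sum_extra_space_alt, List.any_eq_true]
  constructor
  · rintro ⟨c, hc, h⟩
    have h' := List.contains_iff_mem.mp h
    rw [PySem.Set.mem_ofList] at h'
    simp only [List.mem_flatMap, List.mem_map] at h'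
    obtain ⟨a, ha, b, hb, hab⟩ := h'
    exact ⟨a, ha, b, hb, by rwa [show t - a - b = c by omega]⟩
  · rintro ⟨x, hx, y, hy, hz⟩
    refine ⟨t - x - y, hz, List.contains_iff_mem.mpr ?_⟩
    rw [PySem.Set.mem_ofList]
    simp only [List.mem_flatMap, List.mem_map]
    exact ⟨x, hx, y, hy, by omega⟩

-- ===== VERDICT (by name: the statement is the Claim_ definition above) =====
theorem has_three_sum_extra_space_spec : Claim_equal_has_three_sum_extra_space := by
  intro A t _
  unfold Spec_has_three_sum_extra_space
  rw [Bool.eq_iff_iff, hts_A_iff, hts_B_iff]
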